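-- pv_equiv track=rewrite | github.com/Entropyobserver/test | 5LN429/exercises4/4_exercise_3_0.py | get_adj_len
-- ===== SOURCE A (Python) =====
-- def get_clean(word):
--     return word.lower().strip(".,!?()")
--
-- def get_adjacency(word, vowels, consonants):
--     adjacent = 0
--     for i in range(len(word) - 1):
--         if word[i] in vowels and word[i + 1] in vowels:
--             adjacent += 1
--         elif word[i] in consonants and word[i + 1] in consonants:
--             adjacent += 1
--     return adjacent
--
-- def get_adj_len(lines, vowels, consonants):
--     word_scores = {}
--     for line in lines:
--         for word in line.split():
--             word = get_clean(word)
--             adj = get_adjacency(word, vowels, consonants)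
--             adj_len = adj + len(word)
--             word_scores[word] = adj_len
--     return word_scores
-- ===== SOURCE B (Python) =====
-- def get_adj_len(lines, vowels, consonants):
--     # adjacency via run/block counting + inclusion-exclusion, one score per distinct word
--     def pairs_in(w, member):
--         # number of adjacent positions whose both chars satisfy `member`,
--         # computed as (#chars satisfying member) - (#maximal blocks of them)
--         total = blocks = 0
--         inside = False
--         for ch in w:
--             if member(ch):
--                 total += 1
--                 if not inside:
--                     blocks += 1
--                 inside = True
--             else:
--                 inside = False
--         return total - blocks
--
--     def score(w):
--         adj = (pairs_in(w, lambda c: c in vowels)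
--                + pairs_in(w, lambda c: c in consonants)
--                - pairs_in(w, lambda c: c in vowels and c in consonants))
--         return adj + len(w)
--
--     out = {}
--     for line in lines:
--         for word in line.split():
--             w = word.lower().strip(".,!?()")
--             if w not in out:
--                 out[w] = score(w)
--     return out
-- ===== Notes on version B (the rewrite author's own statement) =====
-- stated objective: alternative
-- what changed: Adjacency is computed without ever testing character pairs: for each set, adjacent pairs inside it equal (#member chars) - (#maximal member blocks), counted by a run state machine, and the if/elif branch pair is replaced by inclusion-exclusion over the vowel set, consonant set and their overlap; the dict loop inserts each distinct cleaned word once (skip if present) instead of overwriting every occurrence.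
import Mathlib
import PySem

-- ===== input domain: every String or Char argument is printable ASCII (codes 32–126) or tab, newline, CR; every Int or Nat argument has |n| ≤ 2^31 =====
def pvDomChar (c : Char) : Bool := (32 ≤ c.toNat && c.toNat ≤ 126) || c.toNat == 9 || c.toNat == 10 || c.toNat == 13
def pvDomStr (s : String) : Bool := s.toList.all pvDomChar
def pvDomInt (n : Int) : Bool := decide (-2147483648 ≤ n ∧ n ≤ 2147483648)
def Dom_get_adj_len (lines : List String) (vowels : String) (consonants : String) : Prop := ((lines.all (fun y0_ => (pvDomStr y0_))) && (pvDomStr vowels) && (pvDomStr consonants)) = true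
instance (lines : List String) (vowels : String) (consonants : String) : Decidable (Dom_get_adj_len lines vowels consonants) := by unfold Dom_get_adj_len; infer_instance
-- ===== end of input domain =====

-- B replaces the pairwise if/elif scan by run/block counting (pairs inside a set =
-- members - maximal blocks) combined by inclusion-exclusion, and inserts each distinct
-- cleaned word once instead of overwriting (objective: alternative, same cost).

-- ===== PORT A =====
def pvGetClean (word : String) : String :=
  PySem.Str.stripChars (PySem.Str.lower word) ".,!?()"

def pvGetAdjacency (word : String) (vowels : String) (consonants : String) : Int :=
  (PySem.List.pyRange 0 (PySem.Str.len word - 1) 1).foldl (fun adjacent i =>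
    match PySem.List.pyGet? word.toList i, PySem.List.pyGet? word.toList (i + 1) with
    | some a, some b =>
      if a ∈ vowels.toList ∧ b ∈ vowels.toList then adjacent + 1
      else if a ∈ consonants.toList ∧ b ∈ consonants.toList then adjacent + 1
      else adjacent
    | _, _ => adjacent) 0

def get_adj_len (lines : List String) (vowels : String) (consonants : String) : List (String × Int) :=
  (lines.foldl (fun word_scores line =>
    (PySem.Str.split₀ line).foldl (fun word_scores word =>
      let w := pvGetClean word
      let adj := pvGetAdjacency w vowels consonants
      word_scores.insert w (adj + PySem.Str.len w)) word_scores)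
    (PySem.Dict.empty : PySem.Dict String Int)).items

-- ===== PORT B =====
-- pairs_in: (#chars satisfying member) - (#maximal blocks of them), via a run state machine
def pvPairsIn (member : Char → Bool) (w : List Char) : Int :=
  let st := w.foldl (fun (s : Int × Int × Bool) ch =>
      if member ch then (s.1 + 1, (if s.2.2 then s.2.1 else s.2.1 + 1), true)
      else (s.1, s.2.1, false)) (0, 0, false)
  st.1 - st.2.1

def pvScoreB (vowels consonants : String) (w : String) : Int :=
  let adj := pvPairsIn (fun c => vowels.toList.contains c) w.toList
           + pvPairsIn (fun c => consonants.toList.contains c) w.toList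
           - pvPairsIn (fun c => vowels.toList.contains c && consonants.toList.contains c) w.toList
  adj + PySem.Str.len w

def get_adj_len_alt (lines : List String) (vowels : String) (consonants : String) : List (String × Int) :=
  (lines.foldl (fun out line =>
    (PySem.Str.split₀ line).foldl (fun (out : PySem.Dict String Int) word =>
      let w := PySem.Str.stripChars (PySem.Str.lower word) ".,!?()"
      if out.contains w then out else out.insert w (pvScoreB vowels consonants w)) out)
    (PySem.Dict.empty : PySem.Dict String Int)).items

-- ===== PRECONDITION & SPEC =====
def Spec_get_adj_len (lines : List String) (vowels : String) (consonants : String) (out : List (String × Int)) : Prop := out = get_adj_len_alt lines vowels consonants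
instance (lines : List String) (vowels : String) (consonants : String) (out : List (String × Int)) : Decidable (Spec_get_adj_len lines vowels consonants out) := by unfold Spec_get_adj_len; infer_instance

-- ===== CLAIM (what is proved, stated in full; the proofs are below) =====
def Claim_equal_get_adj_len : Prop := ∀ (lines : List String) (vowels : String) (consonants : String), Dom_get_adj_len lines vowels consonants → Spec_get_adj_len lines vowels consonants (get_adj_len lines vowels consonants)

-- ===== LEMMAS AND PROOFS =====

-- A's loop body at Nat index k, with the two branch tests fused into one boolean
def pvStepN (cs : List Char) (P : Char → Char → Bool) (adj : Int) (k : Nat) : Int :=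
  match cs[k]?, cs[k+1]? with
  | some x, some y => if P x y then adj + 1 else adj
  | _, _ => adj

lemma pvStepN_cons (c : Char) (cs : List Char) (P : Char → Char → Bool) (adj : Int) (k : Nat) :
    pvStepN (c :: cs) P adj (k + 1) = pvStepN cs P adj k := by
  simp [pvStepN]

-- index-fold over range(len-1) = count over the list of consecutive pairs
lemma pvRangeFold_eq_zip (P : Char → Char → Bool) :
    ∀ (cs : List Char) (a : Int),
      (List.range (cs.length - 1)).foldl (pvStepN cs P) a
        = a + ((((cs.zip cs.tail).countP (fun p => P p.1 p.2)) : Nat) : Int)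
  | [], a => by simp
  | [x], a => by simp
  | x :: y :: t, a => by
    have h1 : (x :: y :: t).length - 1 = t.length + 1 := by simp
    rw [h1, List.range_succ_eq_map, List.foldl_cons, List.foldl_map]
    have h2 : ∀ (adj : Int) (k : Nat),
        pvStepN (x :: y :: t) P adj (k + 1) = pvStepN (y :: t) P adj k :=
      fun adj k => pvStepN_cons x (y :: t) P adj k
    simp only [h2]
    have IH := pvRangeFold_eq_zip P (y :: t) (pvStepN (x :: y :: t) P a 0)
    simp only [List.length_cons, Nat.add_sub_cancel] at IH
    rw [IH]
    have h0 : pvStepN (x :: y :: t) P a 0 = if P x y then a + 1 else a := by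
      simp [pvStepN]
    rw [h0]
    by_cases hp : P x y = true
    · simp [hp]; ring
    · simp [hp]

-- the fused boolean test on the A side
def pvP (vowels consonants : String) (a b : Char) : Bool :=
  (vowels.toList.contains a && vowels.toList.contains b)
    || (consonants.toList.contains a && consonants.toList.contains b)

-- A's adjacency loop computes the fused pair count
lemma pvGetAdjacency_eq_zip (w vowels consonants : String) :
    pvGetAdjacency w vowels consonants
      = (((w.toList.zip w.toList.tail).countP
            (fun p => pvP vowels consonants p.1 p.2) : Nat) : Int) := by
  unfold pvGetAdjacency
  have hlen : PySem.Str.len w = (w.toList.length : Int) := by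
    simp [PySem.Str.len]
  rw [hlen, PySem.List.pyRange_one]
  have ht : ((w.toList.length : Int) - 1 - 0).toNat = w.toList.length - 1 := by omega
  rw [ht, List.foldl_map]
  have hbody : ∀ (adj : Int) (k : Nat),
      (fun (adjacent : Int) (i : Int) =>
        match PySem.List.pyGet? w.toList i, PySem.List.pyGet? w.toList (i + 1) with
        | some a, some b =>
          if a ∈ vowels.toList ∧ b ∈ vowels.toList then adjacent + 1
          else if a ∈ consonants.toList ∧ b ∈ consonants.toList then adjacent + 1
          else adjacent
        | _, _ => adjacent) adj ((0 : Int) + (k : Nat))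
        = pvStepN w.toList (pvP vowels consonants) adj k := by
    intro adj k
    have hk1 : (0 : Int) + (k : Nat) = ((k : Nat) : Int) := by omega
    have hk2 : ((k : Nat) : Int) + 1 = (((k + 1 : Nat)) : Int) := by omega
    simp only [hk1, hk2, PySem.List.pyGet?_natCast, pvStepN]
    cases w.toList[k]? with
    | none => rfl
    | some x =>
      cases w.toList[k+1]? with
      | none => rfl
      | some y =>
        simp only [pvP]
        by_cases hv : x ∈ vowels.toList ∧ y ∈ vowels.toList
        · simp [hv.1, hv.2]
        · by_cases hc : x ∈ consonants.toList ∧ y ∈ consonants.toList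
          · simp [hv, hc]
          · simp [hv, hc]
  simp only [hbody]
  rw [pvRangeFold_eq_zip]
  simp

-- the run recursion pvPairsIn's state machine computes, with the "previous char in set" flag
def pvAux (member : Char → Bool) : Bool → List Char → Int
  | _, [] => 0
  | ins, c :: r => (if member c && ins then 1 else 0) + pvAux member (member c) r

lemma pvPairsIn_fold (member : Char → Bool) :
    ∀ (cs : List Char) (t b : Int) (ins : Bool),
      (cs.foldl (fun (s : Int × Int × Bool) ch =>
          if member ch then (s.1 + 1, (if s.2.2 then s.2.1 else s.2.1 + 1), true)
          else (s.1, s.2.1, false)) (t, b, ins)).1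
        - (cs.foldl (fun (s : Int × Int × Bool) ch =>
          if member ch then (s.1 + 1, (if s.2.2 then s.2.1 else s.2.1 + 1), true)
          else (s.1, s.2.1, false)) (t, b, ins)).2.1
        = t - b + pvAux member ins cs
  | [], t, b, ins => by simp [pvAux]
  | c :: r, t, b, ins => by
    have IH := pvPairsIn_fold member r
    cases hm : member c <;> cases hi : ins <;>
      (simp only [List.foldl_cons, hm, pvAux]; rw [IH]; try simp); omega

-- pvAux with flag "member prev" counts the member-member pairs of (prev :: cs)
lemma pvAux_pairs (member : Char → Bool) :
    ∀ (cs : List Char) (c : Char),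
      pvAux member (member c) cs
        = (((c :: cs).zip cs).countP (fun p => member p.1 && member p.2) : Int)
  | [], c => by simp [pvAux]
  | d :: r, c => by
    simp only [pvAux, List.zip_cons_cons, List.countP_cons, pvAux_pairs member r d]
    by_cases h : (member c && member d) = true
    · have h2 : (member d && member c) = true := by
        rw [Bool.and_comm]; exact h
      simp [h, h2]; ring
    · have h2 : (member d && member c) = false := by
        rw [Bool.and_comm]; revert h; cases member c <;> cases member d <;> simp
      simp only [h2]
      revert h; cases (member c && member d) <;> simp

-- pvPairsIn = count of adjacent pairs both in the set
lemma pvPairsIn_eq_zip (member : Char → Bool) (cs : List Char) :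
    pvPairsIn member cs
      = ((cs.zip cs.tail).countP (fun p => member p.1 && member p.2) : Int) := by
  unfold pvPairsIn
  rw [pvPairsIn_fold]
  cases cs with
  | nil => simp [pvAux]
  | cons c r =>
    simp only [pvAux, Bool.and_false, List.tail_cons]
    rw [pvAux_pairs member r c]
    simp

-- inclusion-exclusion over the pair list: |V∨C| = |V| + |C| - |V∧C|
lemma pvInclExcl (V C : Char → Bool) :
    ∀ (l : List (Char × Char)),
      ((l.countP (fun p => (V p.1 && V p.2) || (C p.1 && C p.2))) : Int)
        = (l.countP (fun p => V p.1 && V p.2) : Int)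
          + (l.countP (fun p => C p.1 && C p.2) : Int)
          - (l.countP (fun p => (V p.1 && C p.1) && (V p.2 && C p.2)) : Int)
  | [] => by simp
  | p :: r => by
    simp only [List.countP_cons]
    have IH := pvInclExcl V C r
    cases hv1 : V p.1 <;> cases hv2 : V p.2 <;> cases hc1 : C p.1 <;> cases hc2 : C p.2 <;>
      simp <;> omega

-- A's per-word score equals B's
lemma pvScore_eq (vowels consonants w : String) :
    pvGetAdjacency w vowels consonants + PySem.Str.len w = pvScoreB vowels consonants w := by
  unfold pvScoreB
  rw [pvGetAdjacency_eq_zip, pvPairsIn_eq_zip, pvPairsIn_eq_zip, pvPairsIn_eq_zip]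
  have := pvInclExcl (fun c => vowels.toList.contains c) (fun c => consonants.toList.contains c)
    (w.toList.zip w.toList.tail)
  simp only [pvP]
  rw [this]

-- inserting the value a key already maps to changes nothing
lemma pvInsert_same (d : PySem.Dict String Int) (w : String) (v : Int)
    (hc : d.contains w = true)
    (hv : ∀ p ∈ d.items, p.1 = w → p.2 = v) :
    d.insert w v = d := by
  apply PySem.Dict.ext
  rw [PySem.Dict.items_insert_of_contains d v hc]
  rw [List.map_congr_left (g := id), List.map_id]
  intro p hp
  by_cases h : (p.1 == w) = true
  · have h1 : p.1 = w := eq_of_beq h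
    have h2 := hv p hp h1
    simp [← h1, ← h2]
  · simp [h]

-- both dict loops agree from any dict whose entries already carry B's score
lemma pvFold_eq (vowels consonants : String) :
    ∀ (ws : List String) (d : PySem.Dict String Int),
      d.keys.Nodup →
      (∀ p ∈ d.items, p.2 = pvScoreB vowels consonants p.1) →
      ws.foldl (fun word_scores word =>
          let w := pvGetClean word
          let adj := pvGetAdjacency w vowels consonants
          word_scores.insert w (adj + PySem.Str.len w)) d
        = ws.foldl (fun (out : PySem.Dict String Int) word =>
            let w := PySem.Str.stripChars (PySem.Str.lower word) ".,!?()"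
            if out.contains w then out else out.insert w (pvScoreB vowels consonants w)) d
  | [], d, _, _ => rfl
  | word :: r, d, hnd, hv => by
    rw [List.foldl_cons, List.foldl_cons]
    show List.foldl _ (d.insert (pvGetClean word)
        (pvGetAdjacency (pvGetClean word) vowels consonants
          + PySem.Str.len (pvGetClean word))) r
      = List.foldl _ (if d.contains (pvGetClean word) then d
          else d.insert (pvGetClean word) (pvScoreB vowels consonants (pvGetClean word))) r
    rw [pvScore_eq]
    by_cases hc : d.contains (pvGetClean word) = true
    · rw [if_pos hc, pvInsert_same d (pvGetClean word) _ hc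
        (fun p hp h1 => by rw [hv p hp, h1])]
      exact pvFold_eq vowels consonants r d hnd hv
    · have hc' : d.contains (pvGetClean word) = false := by
        revert hc; cases d.contains (pvGetClean word) <;> simp
      rw [if_neg (by simp [hc'])]
      apply pvFold_eq vowels consonants r
      · exact PySem.Dict.nodup_keys_insert d _ _ hnd
      · intro p hp
        rw [PySem.Dict.items_insert_of_not_contains d _ hc'] at hp
        rcases List.mem_append.mp hp with h | h
        · exact hv p h
        · simp at h; simp [h]

-- folding the per-line word lists one line at a time = folding the flattened word stream
lemma pvFoldl_flatMap {α β γ : Type} (f : α → List β) (g : γ → β → γ) :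
    ∀ (l : List α) (init : γ),
      (l.flatMap f).foldl g init = l.foldl (fun acc x => (f x).foldl g acc) init
  | [], init => rfl
  | x :: t, init => by
    rw [List.flatMap_cons, List.foldl_append, List.foldl_cons, pvFoldl_flatMap f g t]

-- ===== VERDICT (by name: the statement is the Claim_ definition above) =====
theorem get_adj_len_spec : Claim_equal_get_adj_len := by
  intro lines vowels consonants _hdom
  unfold Spec_get_adj_len get_adj_len get_adj_len_alt
  rw [← pvFoldl_flatMap, ← pvFoldl_flatMap]
  rw [pvFold_eq vowels consonants (lines.flatMap PySem.Str.split₀) PySem.Dict.empty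
    (by simp) (by intro p hp; simp [PySem.Dict.empty] at hp)]
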